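-- pv_equiv track=rewrite | github.com/VincentDerekHeld/thesis-bachelor-text2BPMN | project/AnalyzeText.py | adjust_actor_list
-- ===== SOURCE A (Python) =====
-- def adjust_actor_list(valid_actors: [str]) -> list:
--     result = []
--     add = True
--     for i in range(len(valid_actors)):
--         for j in range(len(valid_actors)):
--             if i != j:
--                 if valid_actors[i] in valid_actors[j]:
--                     add = False
--                     break
--         if add:
--             result.append(valid_actors[i])
--         else:
--             add = True
--
--     return result
-- ===== SOURCE B (Python) =====
-- def adjust_actor_list(valid_actors: [str]) -> list:
--     count = {}
--     for a in valid_actors: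
--         count[a] = count.get(a, 0) + 1
--     return [a for a in valid_actors
--             if count[a] == 1 and not any(len(b) > len(a) and a in b for b in valid_actors)]
-- ===== Notes on version B (the rewrite author's own statement) =====
-- stated objective: alternative
-- what changed: Replaces the index-based all-pairs double loop with a frequency dictionary built in one pass plus a value-level filter that only tests substring containment against strictly longer elements.
import Mathlib
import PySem

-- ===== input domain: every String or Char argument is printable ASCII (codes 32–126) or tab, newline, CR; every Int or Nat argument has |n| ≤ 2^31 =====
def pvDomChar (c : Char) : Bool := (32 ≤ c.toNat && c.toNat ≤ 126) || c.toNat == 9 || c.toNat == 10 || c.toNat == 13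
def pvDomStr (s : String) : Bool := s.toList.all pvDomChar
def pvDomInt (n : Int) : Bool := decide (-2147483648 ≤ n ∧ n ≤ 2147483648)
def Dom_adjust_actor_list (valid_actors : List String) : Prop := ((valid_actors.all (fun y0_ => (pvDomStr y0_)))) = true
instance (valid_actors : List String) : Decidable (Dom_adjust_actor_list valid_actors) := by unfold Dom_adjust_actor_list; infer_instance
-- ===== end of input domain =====

-- B replaces A's all-pairs index double loop by a frequency dict plus a filter that
-- only tests containment against strictly longer elements (objective: alternative).

-- ===== PORT A =====
-- inner 'for j' loop with its break: the value of 'add' after the loop for index i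
def pvInnerA (x : String) (i : Int) : List (Int × String) → Bool
  | [] => true
  | (j, y) :: rest =>
    if i ≠ j then
      if PySem.Str.isIn x y then false
      else pvInnerA x i rest
    else pvInnerA x i rest

def adjust_actor_list (valid_actors : List String) : List String :=
  (PySem.List.enumerate valid_actors).foldl
    (fun result p =>
      if pvInnerA p.2 p.1 (PySem.List.enumerate valid_actors) then result ++ [p.2] else result)
    []

-- ===== PORT B =====
-- the 'count[a] = count.get(a, 0) + 1' loop
def pvCount (xs : List String) : PySem.Dict String Int :=
  xs.foldl (fun d a => d.insert a (d.getD a 0 + 1)) PySem.Dict.empty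

-- the comprehension's condition on one element
def pvKeepB (xs : List String) (count : PySem.Dict String Int) (a : String) : Bool :=
  count.getD a 0 == 1 &&
    !(xs.any (fun b => decide (PySem.Str.len a < PySem.Str.len b) && PySem.Str.isIn a b))

def adjust_actor_list_alt (valid_actors : List String) : List String :=
  let count := pvCount valid_actors
  valid_actors.filter (pvKeepB valid_actors count)

-- ===== PRECONDITION & SPEC =====
def Spec_adjust_actor_list (valid_actors : List String) (out : List String) : Prop := out = adjust_actor_list_alt valid_actors
instance (valid_actors : List String) (out : List String) : Decidable (Spec_adjust_actor_list valid_actors out) := by unfold Spec_adjust_actor_list; infer_instance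

-- ===== CLAIM (what is proved, stated in full; the proofs are below) =====
def Claim_equal_adjust_actor_list : Prop := ∀ (valid_actors : List String), Dom_adjust_actor_list valid_actors → Spec_adjust_actor_list valid_actors (adjust_actor_list valid_actors)

-- ===== LEMMAS AND PROOFS =====

theorem pvInnerA_iff (x : String) (i : Int) (l : List (Int × String)) :
    pvInnerA x i l = true ↔ ∀ p ∈ l, p.1 ≠ i → ¬ x.toList <:+: p.2.toList := by
  induction l with
  | nil => simp [pvInnerA]
  | cons q rest ih =>
    obtain ⟨j, y⟩ := q
    by_cases hij : i ≠ j
    · by_cases hin : PySem.Str.isIn x y = true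
      · simp only [pvInnerA, if_pos hij, if_pos hin]
        have := (PySem.Str.isIn_iff_infix x y).mp hin
        simp only [List.mem_cons]
        constructor
        · intro h; cases h
        · intro h
          exact absurd this (h (j, y) (Or.inl rfl) (fun e => hij e.symm))
      · simp only [pvInnerA, if_pos hij, if_neg hin, ih]
        have hni : ¬ x.toList <:+: y.toList :=
          fun h => hin ((PySem.Str.isIn_iff_infix x y).mpr h)
        constructor
        · intro h p hp
          rcases List.mem_cons.mp hp with rfl | hp'
          · exact fun _ => hni
          · exact h p hp'
        · intro h p hp; exact h p (List.mem_cons.mpr (Or.inr hp))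
    · rw [not_not] at hij; subst hij
      simp only [pvInnerA, if_neg (by simp : ¬ i ≠ i), ih]
      constructor
      · intro h p hp
        rcases List.mem_cons.mp hp with rfl | hp'
        · intro hne; exact absurd rfl hne
        · exact fun _ => h p hp' ‹_›
      · intro h p hp; exact h p (List.mem_cons.mpr (Or.inr hp))

theorem pvCount_getD_aux (xs : List String) (d : PySem.Dict String Int) (x : String) :
    (xs.foldl (fun d a => d.insert a (d.getD a 0 + 1)) d).getD x 0
      = d.getD x 0 + (xs.count x : Int) := by
  induction xs generalizing d with
  | nil => simp
  | cons a xs ih =>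
    simp only [List.foldl_cons, ih, PySem.Dict.getD_insert, List.count_cons]
    by_cases h : x = a
    · subst h; simp; ring
    · simp [h, Ne.symm h]

theorem pvCount_getD (xs : List String) (x : String) :
    (pvCount xs).getD x 0 = (xs.count x : Int) := by
  simpa using pvCount_getD_aux xs PySem.Dict.empty x

theorem pvMemSnd (xs : List String) (s : Int) (y : String) :
    y ∈ xs ↔ ∃ p ∈ PySem.List.enumerate xs s, p.2 = y := by
  conv_lhs => rw [← PySem.List.map_snd_enumerate xs s]
  exact List.mem_map

-- the value-level reformulation of "x is not a substring of any other-position element"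
theorem pvKey (xs : List String) (s k : Int) (x : String)
    (hmem : (k, x) ∈ PySem.List.enumerate xs s) :
    ((∀ p ∈ PySem.List.enumerate xs s, p.1 ≠ k → ¬ x.toList <:+: p.2.toList)
      ↔ (xs.count x = 1 ∧ ∀ y ∈ xs, y ≠ x → ¬ x.toList <:+: y.toList)) := by
  induction xs generalizing s with
  | nil => simp [PySem.List.enumerate_nil] at hmem
  | cons a xs ih =>
    rw [PySem.List.enumerate_cons] at hmem ⊢
    have htail_fst : ∀ p ∈ PySem.List.enumerate xs (s + 1), p.1 ≠ s := by
      intro p hp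
      rcases (PySem.List.mem_enumerate_iff xs (s + 1) p).mp hp with ⟨m, hm, rfl⟩
      simp; omega
    rcases List.mem_cons.mp hmem with hhd | htl
    · -- head: k = s, x = a
      have hk : k = s := (Prod.mk.injEq _ _ _ _ ▸ hhd).1.symm ▸ rfl
      have hx : x = a := congrArg Prod.snd hhd
      constructor
      · intro h
        have hall : ∀ y ∈ xs, ¬ x.toList <:+: y.toList := by
          intro y hy
          rcases (pvMemSnd xs (s + 1) y).mp hy with ⟨p, hp, hpy⟩
          exact hpy ▸ h p (List.mem_cons.mpr (Or.inr hp)) (hk ▸ htail_fst p hp)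
        have hnotmem : x ∉ xs := fun hx' => hall x hx' (List.infix_refl _)
        refine ⟨?_, ?_⟩
        · rw [hx] at hnotmem
          simp [hx, List.count_cons_self, List.count_eq_zero.mpr hnotmem]
        · intro y hy hne
          rcases List.mem_cons.mp hy with rfl | hy'
          · exact absurd hx.symm hne
          · exact hall y hy'
      · rintro ⟨hc, hall⟩ p hp hpk
        rcases List.mem_cons.mp hp with rfl | hp'
        · exact absurd hk.symm hpk
        · have hpy : p.2 ∈ xs := (pvMemSnd xs (s + 1) p.2).mpr ⟨p, hp', rfl⟩
          have hnotmem : x ∉ xs := by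
            rw [hx]
            rw [hx, List.count_cons_self] at hc
            exact List.count_eq_zero.mp (by omega)
          exact hall p.2 (List.mem_cons.mpr (Or.inr hpy))
            (fun e => hnotmem (e ▸ hpy))
    · -- tail: (k, x) ∈ enumerate xs (s+1)
      have hk : k ≠ s := htail_fst (k, x) htl
      have hxmem : x ∈ xs := (pvMemSnd xs (s + 1) x).mpr ⟨(k, x), htl, rfl⟩
      have IH := ih (s + 1) htl
      by_cases ha : a = x
      · subst ha
        constructor
        · intro h
          exact absurd (List.infix_refl _)
            (h (s, a) (List.mem_cons.mpr (Or.inl rfl)) (fun e => hk e.symm))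
        · rintro ⟨hc, _⟩
          rw [List.count_cons_self] at hc
          have := List.count_pos_iff.mpr hxmem
          omega
      · have hcnt : (a :: xs).count x = xs.count x := List.count_cons_of_ne ha
        constructor
        · intro h
          have hna : ¬ x.toList <:+: a.toList :=
            h (s, a) (List.mem_cons.mpr (Or.inl rfl)) (fun e => hk e.symm)
          have htail : ∀ p ∈ PySem.List.enumerate xs (s + 1), p.1 ≠ k → ¬ x.toList <:+: p.2.toList :=
            fun p hp => h p (List.mem_cons.mpr (Or.inr hp))
          obtain ⟨hc, hall⟩ := IH.mp htail
          refine ⟨by rw [hcnt]; exact hc, ?_⟩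
          intro y hy hne
          rcases List.mem_cons.mp hy with rfl | hy'
          · exact hna
          · exact hall y hy' hne
        · rintro ⟨hc, hall⟩
          rw [hcnt] at hc
          have htail := IH.mpr ⟨hc, fun y hy hne =>
            hall y (List.mem_cons.mpr (Or.inr hy)) hne⟩
          intro p hp hpk
          rcases List.mem_cons.mp hp with rfl | hp'
          · exact hall a (List.mem_cons.mpr (Or.inl rfl)) ha
          · exact htail p hp' hpk

-- substring-of-a-different-element ↔ substring-of-a-strictly-longer element
theorem pvLen_iff (xs : List String) (x : String) :
    (∀ y ∈ xs, y ≠ x → ¬ x.toList <:+: y.toList)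
      ↔ (∀ b ∈ xs, x.toList.length < b.toList.length → ¬ x.toList <:+: b.toList) := by
  constructor
  · intro h b hb hlen
    exact h b hb (fun e => by subst e; exact lt_irrefl _ hlen)
  · intro h y hy hne hin
    have hle := hin.length_le
    rcases lt_or_eq_of_le hle with hlt | heq
    · exact h y hy hlt hin
    · exact hne (String.toList_inj.mp (hin.eq_of_length heq)).symm

theorem pvKeepB_iff (xs : List String) (x : String) :
    pvKeepB xs (pvCount xs) x = true
      ↔ (xs.count x = 1 ∧ ∀ b ∈ xs, x.toList.length < b.toList.length → ¬ x.toList <:+: b.toList) := by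
  simp only [pvKeepB, Bool.and_eq_true, beq_iff_eq, pvCount_getD, Bool.not_eq_true',
    List.any_eq_false, PySem.Str.len_eq]
  constructor
  · rintro ⟨hc, hany⟩
    refine ⟨by exact_mod_cast hc, ?_⟩
    intro b hb hlen hin
    exact hany b hb ⟨by simp only [decide_eq_true_eq]; exact_mod_cast hlen,
      (PySem.Str.isIn_iff_infix x b).mpr hin⟩
  · rintro ⟨hc, hall⟩
    refine ⟨by exact_mod_cast hc, ?_⟩
    rintro b hb ⟨hd, hi⟩
    have hlen : x.toList.length < b.toList.length := by exact_mod_cast of_decide_eq_true hd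
    exact hall b hb hlen ((PySem.Str.isIn_iff_infix x b).mp hi)

theorem pvFilterMap (xs : List String) (s : Int) (q : Int × String → Bool) (pB : String → Bool)
    (h : ∀ p ∈ PySem.List.enumerate xs s, q p = pB p.2) :
    ((PySem.List.enumerate xs s).filter q).map (fun p => p.2) = xs.filter pB := by
  induction xs generalizing s with
  | nil => simp [PySem.List.enumerate_nil]
  | cons a xs ih =>
    rw [PySem.List.enumerate_cons] at h ⊢
    have hhd := h (s, a) (List.mem_cons.mpr (Or.inl rfl))
    have htl := ih (s + 1) (fun p hp => h p (List.mem_cons.mpr (Or.inr hp)))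
    rcases hb : pB a with _ | _
    · rw [List.filter_cons, List.filter_cons, hhd, hb]
      simpa using htl
    · rw [List.filter_cons, List.filter_cons, hhd, hb]
      simpa using htl

theorem pvMain (xs : List String) : adjust_actor_list xs = adjust_actor_list_alt xs := by
  show (PySem.List.enumerate xs).foldl _ [] = _
  rw [PySem.List.foldl_append_if (fun p => pvInnerA p.2 p.1 (PySem.List.enumerate xs))
    (fun p => p.2) (PySem.List.enumerate xs) [], List.nil_append]
  show _ = xs.filter (pvKeepB xs (pvCount xs))
  apply pvFilterMap
  intro p hp
  rw [Bool.eq_iff_iff, pvInnerA_iff, pvKeepB_iff, ← pvLen_iff]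
  exact pvKey xs 0 p.1 p.2 (by simpa using hp)

-- ===== VERDICT (by name: the statement is the Claim_ definition above) =====
theorem adjust_actor_list_spec : Claim_equal_adjust_actor_list := by
  intro xs _
  unfold Spec_adjust_actor_list
  exact pvMain xs
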